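-- pv_equiv track=rewrite | github.com/awadyn/nic-tuning-experiments | bayesopt/memcached_ax_loop.py | get_nbs
-- ===== SOURCE A (Python) =====
-- def get_nbs(tune_vals):
--     tune_nbs = {}
--     n_itr = len(tune_vals)
--
--     for idx, val in enumerate(tune_vals):
--         low, high = None, None
--
--         if idx>0: low = tune_vals[idx-1]
--         if idx<n_itr-1: high = tune_vals[idx+1]
--
--         tune_nbs[val] = (low, high)
--
--     return tune_nbs
-- ===== SOURCE B (Python) =====
-- def get_nbs(tune_vals):
--     prevs = [None] + tune_vals[:-1]
--     nexts = tune_vals[1:] + [None]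
--     return dict(zip(tune_vals, zip(prevs, nexts)))
-- ===== Notes on version B (the rewrite author's own statement) =====
-- stated objective: idiomatic
-- what changed: Replaces the enumerate loop with bounds-checked index arithmetic by aligning two shifted padded sequences and building the dict in one zip, with no indexing at all.
import Mathlib
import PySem

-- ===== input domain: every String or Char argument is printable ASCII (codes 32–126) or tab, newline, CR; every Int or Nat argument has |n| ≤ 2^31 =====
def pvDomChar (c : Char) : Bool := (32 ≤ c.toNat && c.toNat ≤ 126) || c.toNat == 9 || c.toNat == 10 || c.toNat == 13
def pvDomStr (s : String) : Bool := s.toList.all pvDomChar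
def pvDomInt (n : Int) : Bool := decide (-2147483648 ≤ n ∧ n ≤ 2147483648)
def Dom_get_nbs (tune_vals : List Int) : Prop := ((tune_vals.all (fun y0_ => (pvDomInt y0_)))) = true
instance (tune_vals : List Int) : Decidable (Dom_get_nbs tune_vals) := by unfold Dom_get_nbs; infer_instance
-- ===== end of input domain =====

-- B replaces the enumerate loop with bounds-checked indexing by zipping two shifted padded sequences (idiomatic decomposition, same cost).
-- ===== PORT A =====
def get_nbs (tune_vals : List Int) : List (Int × Option Int × Option Int) :=
  let n_itr : Int := tune_vals.length
  ((PySem.List.enumerate tune_vals).foldl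
    (fun (tune_nbs : PySem.Dict Int (Option Int × Option Int)) p =>
      let low : Option Int := if p.1 > 0 then PySem.List.pyGet? tune_vals (p.1 - 1) else none
      let high : Option Int := if p.1 < n_itr - 1 then PySem.List.pyGet? tune_vals (p.1 + 1) else none
      tune_nbs.insert p.2 (low, high))
    PySem.Dict.empty).items

-- ===== PORT B =====
def get_nbs_alt (tune_vals : List Int) : List (Int × Option Int × Option Int) :=
  let prevs : List (Option Int) := none :: (PySem.List.slice tune_vals none (some (-1))).map some
  let nexts : List (Option Int) := (PySem.List.slice tune_vals (some 1) none).map some ++ [none]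
  (PySem.Dict.ofList (tune_vals.zip (prevs.zip nexts))).items

-- ===== PRECONDITION & SPEC =====
def Spec_get_nbs (tune_vals : List Int) (out : List (Int × Option Int × Option Int)) : Prop := out = get_nbs_alt tune_vals
instance (tune_vals : List Int) (out : List (Int × Option Int × Option Int)) : Decidable (Spec_get_nbs tune_vals out) := by unfold Spec_get_nbs; infer_instance

-- ===== CLAIM (what is proved, stated in full; the proofs are below) =====
def Claim_equal_get_nbs : Prop := ∀ (tune_vals : List Int), Dom_get_nbs tune_vals → Spec_get_nbs tune_vals (get_nbs tune_vals)

-- ===== LEMMAS AND PROOFS =====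

-- The list of (key, value) pairs A's loop inserts equals B's zip of the shifted padded sequences.
theorem pairs_eq (xs : List Int) :
  (PySem.List.enumerate xs).map (fun p => ((p.2 : Int),
     ((if p.1 > 0 then PySem.List.pyGet? xs (p.1-1) else none : Option Int),
      (if p.1 < (xs.length:Int) - 1 then PySem.List.pyGet? xs (p.1+1) else none : Option Int))))
  = xs.zip ((none :: xs.dropLast.map some).zip (xs.tail.map some ++ [none])) := by
  rcases xs with _ | ⟨a, ys⟩
  · rfl
  · apply List.ext_getElem
    · simp [PySem.List.length_enumerate]
    · intro k h1 h2
      have hk : k < (a :: ys).length := by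
        simpa [PySem.List.length_enumerate] using h1
      simp only [List.getElem_map, PySem.List.getElem_enumerate, List.getElem_zip, zero_add]
      refine Prod.ext rfl (Prod.ext ?_ ?_)
      · -- prevs component
        rcases k with _ | j
        · simp
        · have h1' : ((j:Int) + 1) - 1 = (j : Int) := by ring
          have hj : j < (a :: ys).dropLast.length := by
            simp at hk ⊢; omega
          simp only [Nat.cast_add, Nat.cast_one, List.getElem_cons_succ]
          rw [if_pos (by positivity), h1', PySem.List.pyGet?_natCast,
              List.getElem_map, List.getElem_dropLast,
              List.getElem?_eq_getElem]
      · -- nexts component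
        by_cases hk2 : k < ys.length
        · have hc : ((k:Int)) < ((a :: ys).length : Int) - 1 := by
            simp; omega
          have hk3 : k < ((a :: ys).tail.map some).length := by simp [hk2]
          rw [if_pos hc, show ((k:Int) + 1) = ((k+1 : Nat) : Int) by push_cast; ring,
              PySem.List.pyGet?_natCast, List.getElem_append_left hk3,
              List.getElem_map, List.getElem_tail, List.getElem?_eq_getElem]
        · have hke : k = ys.length := by simp at hk; omega
          have hc : ¬ ((k:Int) < ((a :: ys).length : Int) - 1) := by
            simp; omega
          rw [if_neg hc, List.getElem_append_right (by simp [hke])]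
          simp [hke]

theorem get_nbs_eq_alt (xs : List Int) : get_nbs xs = get_nbs_alt xs := by
  unfold get_nbs get_nbs_alt
  simp only [PySem.List.slice_to_neg_one, PySem.List.slice_from_one]
  rw [← pairs_eq]
  simp only [PySem.Dict.ofList, PySem.Dict.update, List.foldl_map]

-- ===== VERDICT (by name: the statement is the Claim_ definition above) =====
theorem get_nbs_spec : Claim_equal_get_nbs := by
  intro xs _
  exact get_nbs_eq_alt xs
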